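-- pv_equiv track=rewrite | github.com/bitterndumpling/bangdream_mbti | dataset/add_multilingual_names_and_descriptions.py | replace_meta_line
-- ===== SOURCE A (Python) =====
-- def replace_meta_line(lines: list[str], prefix: str, value: str, insert_after: str | None = None) -> list[str]:
--     target = f"{prefix}{value}"
--     for idx, line in enumerate(lines):
--         if line.startswith(prefix):
--             lines[idx] = target
--             return lines
--     if insert_after is not None:
--         for idx, line in enumerate(lines):
--             if line.startswith(insert_after):
--                 lines.insert(idx + 1, target)
--                 return lines
--     lines.append(target)
--     return lines
-- ===== SOURCE B (Python) =====
-- def replace_meta_line(lines: list[str], prefix: str, value: str, insert_after: str | None = None) -> list[str]: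
--     target = f"{prefix}{value}"
--     insert_idx = None
--     for idx, line in enumerate(lines):
--         if line.startswith(prefix):
--             lines[idx] = target
--             return lines
--         if insert_idx is None and insert_after is not None and line.startswith(insert_after):
--             insert_idx = idx
--     if insert_idx is not None:
--         lines.insert(insert_idx + 1, target)
--     else:
--         lines.append(target)
--     return lines
-- ===== Notes on version B (the rewrite author's own statement) =====
-- stated objective: alternative
-- what changed: Single pass with enumerate replaces A's two sequential scans: the first prefix match replaces-and-returns immediately, while the index of the first insert_after match is recorded on the fly and used (or append) after the loop.
import Mathlib
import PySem

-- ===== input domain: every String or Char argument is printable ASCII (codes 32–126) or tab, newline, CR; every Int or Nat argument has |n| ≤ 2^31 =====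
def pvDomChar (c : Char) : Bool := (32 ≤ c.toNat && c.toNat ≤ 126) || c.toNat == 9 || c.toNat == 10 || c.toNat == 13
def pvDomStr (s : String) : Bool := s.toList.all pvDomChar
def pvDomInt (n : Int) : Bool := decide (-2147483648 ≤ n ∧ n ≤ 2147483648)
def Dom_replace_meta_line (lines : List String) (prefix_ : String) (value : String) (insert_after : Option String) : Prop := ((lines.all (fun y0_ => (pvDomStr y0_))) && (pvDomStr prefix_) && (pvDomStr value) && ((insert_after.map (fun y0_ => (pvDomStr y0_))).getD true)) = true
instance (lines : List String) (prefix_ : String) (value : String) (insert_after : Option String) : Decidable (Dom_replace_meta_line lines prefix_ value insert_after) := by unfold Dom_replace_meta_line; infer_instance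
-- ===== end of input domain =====

-- B replaces A's two sequential scans by one enumerate pass recording the first insert_after index
-- (objective: alternative decomposition, same O(n) cost). Both A and B mutate `lines` in place in
-- Python; the equivalence proved here is about the returned list.

-- ===== PORT A =====
-- first for-loop of A: return the mutated list at the first line starting with prefix_
def pvLoopA1 (p tgt : String) : List String → Option (List String)
  | [] => none
  | l :: rest =>
    if PySem.Str.startswith l p then some (tgt :: rest)
    else (pvLoopA1 p tgt rest).map (l :: ·)

-- second for-loop of A: insert target after the first line starting with insert_after
def pvLoopA2 (a tgt : String) : List String → Option (List String)
  | [] => none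
  | l :: rest =>
    if PySem.Str.startswith l a then some (l :: tgt :: rest)
    else (pvLoopA2 a tgt rest).map (l :: ·)

def replace_meta_line (lines : List String) (prefix_ : String) (value : String) (insert_after : Option String) : List String :=
  let target := prefix_ ++ value
  match pvLoopA1 prefix_ target lines with
  | some r => r
  | none =>
    match insert_after with
    | some a =>
      match pvLoopA2 a target lines with
      | some r => r
      | none => lines ++ [target]
    | none => lines ++ [target]

-- ===== PORT B =====
-- B's single for-loop: `full` is the list being mutated, `idx` the enumerate counter,
-- `ins` the recorded insert_idx; after the loop, insert at ins+1 or append.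
def pvLoopB (full : List String) (p tgt : String) (ia : Option String) : List String → Nat → Option Nat → List String
  | [], _, ins =>
    match ins with
    | some i => PySem.List.insert full ((i : Int) + 1) tgt
    | none => full ++ [tgt]
  | l :: rest, idx, ins =>
    if PySem.Str.startswith l p then full.set idx tgt
    else
      pvLoopB full p tgt ia rest (idx + 1)
        (match ins, ia with
         | none, some a => if PySem.Str.startswith l a then some idx else none
         | _, _ => ins)

def replace_meta_line_alt (lines : List String) (prefix_ : String) (value : String) (insert_after : Option String) : List String :=
  let target := prefix_ ++ value
  pvLoopB lines prefix_ target insert_after lines 0 none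

-- ===== PRECONDITION & SPEC =====
def Spec_replace_meta_line (lines : List String) (prefix_ : String) (value : String) (insert_after : Option String) (out : List String) : Prop := out = replace_meta_line_alt lines prefix_ value insert_after
instance (lines : List String) (prefix_ : String) (value : String) (insert_after : Option String) (out : List String) : Decidable (Spec_replace_meta_line lines prefix_ value insert_after out) := by unfold Spec_replace_meta_line; infer_instance

-- ===== CLAIM (what is proved, stated in full; the proofs are below) =====
def Claim_equal_replace_meta_line : Prop := ∀ (lines : List String) (prefix_ : String) (value : String) (insert_after : Option String), Dom_replace_meta_line lines prefix_ value insert_after → Spec_replace_meta_line lines prefix_ value insert_after (replace_meta_line lines prefix_ value insert_after)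

-- ===== LEMMAS AND PROOFS =====

theorem pv_insert_mid (acc : List String) (l tgt : String) (rest : List String) :
    PySem.List.insert (acc ++ l :: rest) ((acc.length : Int) + 1) tgt = acc ++ l :: tgt :: rest := by
  have h : acc.length + 1 ≤ (acc ++ l :: rest).length := by simp
  have e := PySem.List.insert_natCast (acc ++ l :: rest) (acc.length + 1) tgt h
  rw [show ((acc.length : Int) + 1) = ((acc.length + 1 : Nat) : Int) by push_cast; ring, e]
  rw [show acc ++ l :: rest = (acc ++ [l]) ++ rest by simp,
      show acc.length + 1 = (acc ++ [l]).length by simp]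
  rw [List.take_left, List.drop_left]
  simp

-- loop B with insert_idx already fixed at i, seen at split full = acc ++ rem
theorem pvLoopB_some (p tgt : String) (ia : Option String) (i : Nat) :
    ∀ (rem acc : List String),
      pvLoopB (acc ++ rem) p tgt ia rem acc.length (some i) =
        match pvLoopA1 p tgt rem with
        | some r => acc ++ r
        | none => PySem.List.insert (acc ++ rem) ((i : Int) + 1) tgt := by
  intro rem
  induction rem with
  | nil => intro acc; rfl
  | cons l rest ih =>
    intro acc
    by_cases h : PySem.Chars.startswith l.toList p.toList = true
    · simp [pvLoopB, pvLoopA1, h]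
    · simp only [pvLoopB, pvLoopA1, PySem.Str.startswith_eq, h, Bool.false_eq_true, if_false]
      have e := ih (acc ++ [l])
      simp only [List.append_assoc, List.length_append, List.length_cons, List.length_nil,
        List.cons_append, List.nil_append] at e
      rw [show acc.length + 1 = acc.length + (1 + 0) by omega] at e ⊢
      rw [e]
      cases hA : pvLoopA1 p tgt rest <;> simp

-- B's loop with insert_idx still unset, seen at split full = acc ++ rem, equals A's two scans on rem
theorem pvLoopB_none (p tgt : String) (ia : Option String) :
    ∀ (rem acc : List String),
      pvLoopB (acc ++ rem) p tgt ia rem acc.length none =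
        match pvLoopA1 p tgt rem with
        | some r => acc ++ r
        | none =>
          match ia with
          | some a =>
            match pvLoopA2 a tgt rem with
            | some r => acc ++ r
            | none => (acc ++ rem) ++ [tgt]
          | none => (acc ++ rem) ++ [tgt] := by
  intro rem
  induction rem with
  | nil =>
    intro acc
    cases ia <;> simp [pvLoopB, pvLoopA1, pvLoopA2]
  | cons l rest ih =>
    intro acc
    by_cases h : PySem.Chars.startswith l.toList p.toList = true
    · cases ia <;> simp [pvLoopB, pvLoopA1, h]
    · simp only [pvLoopB, pvLoopA1, PySem.Str.startswith_eq, h, Bool.false_eq_true, if_false]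
      cases ia with
      | none =>
        have e := ih (acc ++ [l])
        simp only [List.append_assoc, List.length_append, List.length_cons, List.length_nil,
          List.cons_append, List.nil_append] at e
        rw [show acc.length + 1 = acc.length + (1 + 0) by omega] at e ⊢
        rw [e]
        cases hA : pvLoopA1 p tgt rest <;> simp
      | some a =>
        by_cases ha : PySem.Chars.startswith l.toList a.toList = true
        · simp only [ha, if_pos]
          have e := pvLoopB_some p tgt (some a) acc.length rest (acc ++ [l])
          simp only [List.append_assoc, List.length_append, List.length_cons, List.length_nil,
            List.cons_append, List.nil_append] at e
          rw [show acc.length + 1 = acc.length + (1 + 0) by omega] at e ⊢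
          rw [e]
          cases hA : pvLoopA1 p tgt rest with
          | some r => simp
          | none => simp [pvLoopA2, ha, pv_insert_mid]
        · simp only [ha, Bool.false_eq_true, if_false]
          have e := ih (acc ++ [l])
          simp only [List.append_assoc, List.length_append, List.length_cons, List.length_nil,
            List.cons_append, List.nil_append] at e
          rw [show acc.length + 1 = acc.length + (1 + 0) by omega] at e ⊢
          rw [e]
          cases hA : pvLoopA1 p tgt rest with
          | some r => simp
          | none =>
            cases h2 : pvLoopA2 a tgt rest <;> simp [pvLoopA2, ha, h2]

-- ===== VERDICT (by name: the statement is the Claim_ definition above) =====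
theorem replace_meta_line_spec : Claim_equal_replace_meta_line := by
  intro lines prefix_ value insert_after _
  unfold Spec_replace_meta_line replace_meta_line replace_meta_line_alt
  have := pvLoopB_none prefix_ (prefix_ ++ value) insert_after lines []
  simp only [List.nil_append, List.length_nil] at this
  rw [this]
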